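-- pv_equiv track=rewrite | github.com/inesouazene/holbertonschool-Markdown2HTML | markdown2html.py | convert_markdown_heading_to_html
-- ===== SOURCE A (Python) =====
-- def convert_markdown_heading_to_html(lines):
--     """
--     Convert Markdown heading syntax to HTML.
--
--     Args:
--         lines (list): List of lines from the Markdown file.
--
--     Returns:
--         list: List of converted lines with HTML headings.
--     """
--     converted_lines = []
--     for line in lines:
--         for i in range(6, 0, -1):
--             # Exactly i hashes followed by a space
--             if line.startswith("#" * i + " "):
--                 line = f"<h{i}>{line[i+1:].strip()}</h{i}>\n"
--                 break
--         converted_lines.append(line)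
--     return converted_lines
-- ===== SOURCE B (Python) =====
-- def _heading(line):
--     level = len(line) - len(line.lstrip('#'))
--     if 1 <= level <= 6 and line[level:level + 1] == ' ':
--         return f"<h{level}>{line[level + 1:].strip()}</h{level}>\n"
--     return line
--
--
-- def convert_markdown_heading_to_html(lines):
--     """Convert Markdown heading syntax to HTML (per-line helper, no inner loop)."""
--     return [_heading(line) for line in lines]
-- ===== Notes on version B (the rewrite author's own statement) =====
-- stated objective: simpler
-- what changed: Replaces A's descending inner loop of six startswith probes (each rebuilding '#'*i+' ') with a single count of leading hashes plus one bounds-and-space test per line, and builds the result as a comprehension over a per-line helper instead of an accumulator loop with break.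
import Mathlib
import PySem

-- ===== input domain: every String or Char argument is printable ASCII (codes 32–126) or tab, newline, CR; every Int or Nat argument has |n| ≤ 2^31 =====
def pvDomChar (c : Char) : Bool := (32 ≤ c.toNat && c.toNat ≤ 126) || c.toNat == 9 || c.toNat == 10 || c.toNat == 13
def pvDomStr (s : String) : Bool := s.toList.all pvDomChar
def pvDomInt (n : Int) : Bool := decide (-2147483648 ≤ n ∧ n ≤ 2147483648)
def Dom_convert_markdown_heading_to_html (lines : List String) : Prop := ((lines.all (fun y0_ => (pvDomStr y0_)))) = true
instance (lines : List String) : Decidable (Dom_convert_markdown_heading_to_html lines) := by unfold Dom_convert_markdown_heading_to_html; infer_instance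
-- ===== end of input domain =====

-- B replaces A's descending six-probe startswith loop with a single leading-hash count per line; objective: simpler.


-- ===== PORT A =====
-- f"<h{i}>{line[i+1:].strip()}</h{i}>\n"
def pvWrapA (i : Int) (line : List Char) : List Char :=
  "<h".toList ++ (PySem.Int.toStr i).toList ++ ">".toList
    ++ PySem.Chars.strip (PySem.Chars.slice line (some (i + 1)) none)
    ++ "</h".toList ++ (PySem.Int.toStr i).toList ++ ">\n".toList

-- the inner 'for i in range(6,0,-1): if line.startswith("#"*i+" "): …; break'
def pvALine : List Int → List Char → List Char
  | [], line => line
  | i :: rest, line =>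
      if PySem.Chars.startswith line (List.replicate i.toNat '#' ++ [' ']) = true
      then pvWrapA i line
      else pvALine rest line

def convert_markdown_heading_to_html (lines : List String) : List String :=
  lines.foldl
    (fun converted_lines line =>
      converted_lines ++ [String.mk (pvALine (PySem.List.pyRange 6 0 (-1)) line.toList)])
    []

-- ===== PORT B =====
-- f"<h{level}>{line[level+1:].strip()}</h{level}>\n"
def pvWrapB (level : Int) (line : List Char) : List Char :=
  "<h".toList ++ (PySem.Int.toStr level).toList ++ ">".toList
    ++ PySem.Chars.strip (PySem.Chars.slice line (some (level + 1)) none)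
    ++ "</h".toList ++ (PySem.Int.toStr level).toList ++ ">\n".toList

-- level = len(line) - len(line.lstrip('#')); lstrip('#') ported by hand as dropWhile (· == '#'), which is exact
def pvBLine (line : List Char) : List Char :=
  let level : Int := (line.length : Int) - ((line.dropWhile (· == '#')).length : Int)
  if 1 ≤ level ∧ level ≤ 6 ∧ PySem.Chars.slice line (some level) (some (level + 1)) = [' ']
  then pvWrapB level line
  else line

def convert_markdown_heading_to_html_alt (lines : List String) : List String :=
  lines.map (fun line => String.mk (pvBLine line.toList))

-- ===== PRECONDITION & SPEC =====
def Spec_convert_markdown_heading_to_html (lines : List String) (out : List String) : Prop := out = convert_markdown_heading_to_html_alt lines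
instance (lines : List String) (out : List String) : Decidable (Spec_convert_markdown_heading_to_html lines out) := by unfold Spec_convert_markdown_heading_to_html; infer_instance

-- ===== CLAIM (what is proved, stated in full; the proofs are below) =====
def Claim_equal_convert_markdown_heading_to_html : Prop := ∀ (lines : List String), Dom_convert_markdown_heading_to_html lines → Spec_convert_markdown_heading_to_html lines (convert_markdown_heading_to_html lines)

-- ===== LEMMAS AND PROOFS =====

-- 'line.startswith("#"*i + " ")' holds iff the leading-hash run has length exactly i and the next char is ' '
theorem pv_sw_iff (i : Nat) (cs : List Char) :
    PySem.Chars.startswith cs (List.replicate i '#' ++ [' ']) = true ↔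
      (cs.takeWhile (· == '#')).length = i ∧ cs[i]? = some ' ' := by
  rw [PySem.Chars.startswith_iff]
  induction i generalizing cs with
  | zero =>
    cases cs with
    | nil => simp
    | cons c cs =>
      simp only [List.replicate, List.nil_append, List.takeWhile]
      constructor
      · rintro h
        have hc : c = ' ' := by
          rcases h with ⟨t, ht⟩
          simpa using congrArg (·.head?) ht.symm
        subst hc; simp
      · rintro ⟨h1, h2⟩
        simp only [List.getElem?_cons_zero, Option.some.injEq] at h2
        subst h2
        exact ⟨cs, rfl⟩
  | succ n ih =>
    cases cs with
    | nil => simp [List.replicate]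
    | cons c cs =>
      simp only [List.replicate, List.cons_append, List.takeWhile_cons, List.getElem?_cons_succ]
      constructor
      · rintro h
        have hc : c = '#' := by
          rcases h with ⟨t, ht⟩
          simpa using congrArg (·.head?) ht.symm
        subst hc
        have h' : List.replicate n '#' ++ [' '] <+: cs := by
          rcases h with ⟨t, ht⟩
          exact ⟨t, by simpa using ht⟩
        rcases (ih cs).mp h' with ⟨h1, h2⟩
        refine ⟨?_, h2⟩
        simp [h1]
      · rintro ⟨h1, h2⟩
        by_cases hc : c = '#'
        · subst hc
          simp only [beq_self_eq_true, if_true, List.length_cons] at h1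
          have := (ih cs).mpr ⟨by omega, h2⟩
          rcases this with ⟨t, ht⟩
          exact ⟨t, by simp [ht]⟩
        · simp [hc] at h1

theorem pv_take_one (l : List Char) (a : Char) : l.take 1 = [a] ↔ l.head? = some a := by
  cases l <;> simp

-- slice line[k:k+1] = [' '] iff line[k] is ' '
theorem pv_slice_iff (cs : List Char) (k : Nat) :
    PySem.Chars.slice cs (some (k : Int)) (some ((k : Int) + 1)) = [' '] ↔ cs[k]? = some ' ' := by
  have : ((k : Int) + 1) = ((k + 1 : Nat) : Int) := by push_cast; ring
  rw [this, PySem.Chars.slice_eq_listSlice, PySem.List.slice_natCast]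
  have h2 : k + 1 - k = 1 := by omega
  rw [h2, pv_take_one, List.head?_drop]

theorem pv_line_eq (cs : List Char) :
    pvALine (PySem.List.pyRange 6 0 (-1)) cs = pvBLine cs := by
  have hr : PySem.List.pyRange 6 0 (-1) = [6, 5, 4, 3, 2, 1] := by decide
  rw [hr]
  obtain ⟨k, hk⟩ : ∃ k, (cs.takeWhile (· == '#')).length = k := ⟨_, rfl⟩
  have hkle : k ≤ cs.length := hk ▸ (List.takeWhile_sublist _).length_le
  have hdl : (cs.dropWhile (· == '#')).length = cs.length - k := by
    have h := congrArg List.length (List.takeWhile_append_dropWhile (p := (· == '#')) (l := cs))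
    simp only [List.length_append] at h
    omega
  have hlevel : ((cs.length : Int) - ((cs.dropWhile (· == '#')).length : Int)) = (k : Int) := by
    rw [hdl]; omega
  have t6 : ((6:Int).toNat) = 6 := rfl
  have t5 : ((5:Int).toNat) = 5 := rfl
  have t4 : ((4:Int).toNat) = 4 := rfl
  have t3 : ((3:Int).toNat) = 3 := rfl
  have t2 : ((2:Int).toNat) = 2 := rfl
  have t1 : ((1:Int).toNat) = 1 := rfl
  simp only [pvALine, pvBLine, hlevel, pv_sw_iff, pv_slice_iff, hk, t6, t5, t4, t3, t2, t1]
  by_cases hb : 1 ≤ k ∧ k ≤ 6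
  · obtain ⟨hb1, hb2⟩ := hb
    interval_cases k <;>
      · norm_num
        split_ifs <;> simp_all [pvWrapA, pvWrapB]
  · have hB : ¬ (1 ≤ (k:Int) ∧ (k:Int) ≤ 6 ∧ cs[k]? = some ' ') := by
      rintro ⟨x, y, _⟩
      exact hb ⟨by exact_mod_cast x, by exact_mod_cast y⟩
    rw [if_neg hB]
    have h6 : ¬ k = 6 := by omega
    have h5 : ¬ k = 5 := by omega
    have h4 : ¬ k = 4 := by omega
    have h3 : ¬ k = 3 := by omega
    have h2 : ¬ k = 2 := by omega
    have h1 : ¬ k = 1 := by omega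
    simp [h6, h5, h4, h3, h2, h1]

theorem pv_foldl_append (f : String → String) (l : List String) (acc : List String) :
    l.foldl (fun a x => a ++ [f x]) acc = acc ++ l.map f := by
  induction l generalizing acc with
  | nil => simp
  | cons x xs ih => simp [ih]

-- ===== VERDICT (by name: the statement is the Claim_ definition above) =====
theorem convert_markdown_heading_to_html_spec : Claim_equal_convert_markdown_heading_to_html := by
  intro lines _
  unfold Spec_convert_markdown_heading_to_html convert_markdown_heading_to_html convert_markdown_heading_to_html_alt
  rw [pv_foldl_append]
  simp [pv_line_eq]
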